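-- pv_equiv track=rewrite | github.com/linhdvu14/cp-sols | sols/CodeForces/1703_d4/E_Mirror_Grid.py | solve
-- ===== SOURCE A (Python) =====
-- def solve(N, grid):
--     res = 0
--     for i in range(N//2):
--         for c in range(i, N-i-1):
--             r = i
--             ones = 0
--             for _ in range(4):
--                 if grid[r][c] == '1': ones += 1
--                 r, c = c, N-1-r
--             res += min(ones, 4 - ones)
--
--     return res
-- ===== SOURCE B (Python) =====
-- def solve(N, grid):
--     # Scan every cell; a cell contributes once per rotation orbit, when it is
--     # the lexicographically smallest member of its 4-cell rotation orbit.
--     res = 0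
--     for r in range(N):
--         for c in range(N):
--             orb = [(r, c), (c, N - 1 - r), (N - 1 - r, N - 1 - c), (N - 1 - c, r)]
--             if all((r, c) <= p for p in orb):
--                 ones = sum(1 for x, y in orb if grid[x][y] == '1')
--                 res += min(ones, 4 - ones)
--     return res
-- ===== Notes on version B (the rewrite author's own statement) =====
-- stated objective: alternative
-- what changed: A walks only the top 'wedge' of the grid (i < N//2, i <= c < N-1-i) rotating a (r,c) state cursor four times; B scans every cell of the square once and counts an orbit exactly when the cell is the lexicographic minimum of its 4-rotation orbit, so the iteration region is decided by a per-cell canonical-representative test instead of A's wedge geometry.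
-- outside the precondition, e.g. on solve(1, []): A returns 0, B raises IndexError; on solve(1, ['']): A returns 0, B raises IndexError
import Mathlib
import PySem

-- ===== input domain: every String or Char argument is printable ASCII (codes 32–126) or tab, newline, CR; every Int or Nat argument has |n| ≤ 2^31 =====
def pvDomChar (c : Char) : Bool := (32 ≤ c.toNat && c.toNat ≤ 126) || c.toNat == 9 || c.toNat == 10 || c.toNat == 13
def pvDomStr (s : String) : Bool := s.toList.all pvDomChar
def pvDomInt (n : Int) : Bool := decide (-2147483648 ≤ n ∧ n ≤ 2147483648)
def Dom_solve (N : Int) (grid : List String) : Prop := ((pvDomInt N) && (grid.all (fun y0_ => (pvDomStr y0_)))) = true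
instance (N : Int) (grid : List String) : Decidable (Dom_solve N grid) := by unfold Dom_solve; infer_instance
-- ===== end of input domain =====

-- B is an alternative of the same cost: it scans every cell and counts an orbit exactly when the
-- cell is the lexicographic minimum of its 4-rotation orbit, instead of A's wedge-region loop.

-- ===== PORT A =====
-- shared low-level cell accessor grid[r][c]; the defaults are unreachable under Pre_
def pvCell (grid : List String) (r c : Int) : Char :=
  (PySem.Str.pyGet? (PySem.List.pyGetD grid r "") c).getD ' '

def solve (N : Int) (grid : List String) : Int :=
  (PySem.List.pyRange 0 (PySem.Int.floordiv N 2) 1).foldl (fun res i =>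
    (PySem.List.pyRange i (N - i - 1) 1).foldl (fun res c =>
      let st := (PySem.List.pyRange 0 4 1).foldl
        (fun (st : Int × Int × Int) _ =>
          (st.2.1, N - 1 - st.1,
            if pvCell grid st.1 st.2.1 == '1' then st.2.2 + 1 else st.2.2))
        (i, c, 0)
      res + min st.2.2 (4 - st.2.2)) res) 0

-- ===== PORT B =====
def pvLexLe (a b : Int × Int) : Bool :=
  decide (a.1 < b.1 ∨ (a.1 = b.1 ∧ a.2 ≤ b.2))

def pvOrbit (N r c : Int) : List (Int × Int) :=
  [(r, c), (c, N - 1 - r), (N - 1 - r, N - 1 - c), (N - 1 - c, r)]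

def solve_alt (N : Int) (grid : List String) : Int :=
  (PySem.List.pyRange 0 N 1).foldl (fun res r =>
    (PySem.List.pyRange 0 N 1).foldl (fun res c =>
      let orb := pvOrbit N r c
      if orb.all (fun p => pvLexLe (r, c) p) then
        let ones : Int := ((orb.countP (fun p => pvCell grid p.1 p.2 == '1') : ℕ) : Int)
        res + min ones (4 - ones)
      else res) res) 0

-- ===== PRECONDITION & SPEC =====
-- Pre_ excludes undersized/ragged grids (fewer than N rows, or a row shorter than N among the
-- first N rows), on which the Python A raises IndexError — except that for N = 1 A happens to
-- inspect no cell and returns 0 on any grid, while B reads the single cell.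
def Pre_solve (N : Int) (grid : List String) : Prop :=
  N ≤ (grid.length : Int) ∧ ∀ s ∈ grid.take N.toNat, N ≤ PySem.Str.len s
instance (N : Int) (grid : List String) : Decidable (Pre_solve N grid) := by
  unfold Pre_solve; infer_instance

def pvWitness_solve : Int × List String := (2, ["10", "01"])

def Spec_solve (N : Int) (grid : List String) (out : Int) : Prop := out = solve_alt N grid
instance (N : Int) (grid : List String) (out : Int) : Decidable (Spec_solve N grid out) := by
  unfold Spec_solve; infer_instance

-- ===== CLAIM (what is proved, stated in full; the proofs are below) =====
def Claim_equal_solve : Prop := ∀ (N : Int) (grid : List String), Dom_solve N grid → Pre_solve N grid → Spec_solve N grid (solve N grid)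

-- ===== LEMMAS AND PROOFS =====

-- the per-orbit contribution both programs compute for the orbit started at (r, c)
def pvG (N : Int) (grid : List String) (r c : Int) : Int :=
  min (((pvOrbit N r c).countP (fun p => pvCell grid p.1 p.2 == '1') : ℕ) : Int)
    (4 - (((pvOrbit N r c).countP (fun p => pvCell grid p.1 p.2 == '1') : ℕ) : Int))

-- the two iteration regions, as conditions on the coordinates
abbrev pvWedge (N r c : Int) : Prop := 2 * r + 1 < N ∧ r ≤ c ∧ c + 1 < N - r
abbrev pvCanon (N r c : Int) : Prop :=
  (r < c ∨ (r = c ∧ c ≤ N - 1 - r)) ∧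
  (r < N - 1 - r ∨ (r = N - 1 - r ∧ c ≤ N - 1 - c)) ∧
  (r < N - 1 - c ∨ (r = N - 1 - c ∧ c ≤ r))

lemma pv_canon_iff (N r c : Int) :
    pvCanon N r c ↔ pvWedge N r c ∨ (N = 2 * r + 1 ∧ r = c) := by
  unfold pvCanon pvWedge; omega

lemma pv_canon_test (N r c : Int) :
    ((pvOrbit N r c).all (fun p => pvLexLe (r, c) p) = true) ↔ pvCanon N r c := by
  simp only [pvOrbit, pvLexLe, List.all_cons, List.all_nil, Bool.and_eq_true,
    decide_eq_true_eq, lt_self_iff_false, le_refl, and_true, true_and, false_or, and_self]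

lemma pv_sum_map_range (n : ℕ) (f : ℕ → Int) :
    ((List.range n).map f).sum = ∑ k ∈ Finset.range n, f k := by
  induction n with
  | zero => simp
  | succ m ih => simp [List.range_succ, Finset.sum_range_succ, ih]

lemma pv_sum_pyRange (a b : Int) (f : Int → Int) :
    ((PySem.List.pyRange a b 1).map f).sum
      = ∑ k ∈ Finset.range (b - a).toNat, f (a + (k : Int)) := by
  rw [PySem.List.pyRange_one, List.map_map, pv_sum_map_range]
  rfl

-- A's rotating 4-step inner loop computes pvG
lemma pv_A_inner (N : Int) (grid : List String) (i c : Int) :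
    min ((PySem.List.pyRange 0 4 1).foldl
        (fun (st : Int × Int × Int) _ =>
          (st.2.1, N - 1 - st.1,
            if pvCell grid st.1 st.2.1 == '1' then st.2.2 + 1 else st.2.2))
        (i, c, 0)).2.2
      (4 - ((PySem.List.pyRange 0 4 1).foldl
        (fun (st : Int × Int × Int) _ =>
          (st.2.1, N - 1 - st.1,
            if pvCell grid st.1 st.2.1 == '1' then st.2.2 + 1 else st.2.2))
        (i, c, 0)).2.2) = pvG N grid i c := by
  have h4 : PySem.List.pyRange 0 4 1 = [0, 1, 2, 3] := by decide
  rw [h4]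
  have hlast : N - 1 - (N - 1 - i) = i := by ring
  simp only [List.foldl, pvG, pvOrbit, List.countP, List.countP.go, hlast]
  cases h1 : pvCell grid i c == '1' <;>
  cases h2 : pvCell grid c (N - 1 - i) == '1' <;>
  cases h3 : pvCell grid (N - 1 - i) (N - 1 - c) == '1' <;>
  cases h4' : pvCell grid (N - 1 - c) i == '1' <;>
    simp

-- the odd-N centre orbit contributes 0
lemma pv_center_zero (N : Int) (grid : List String) (r : Int) (h : N - 1 - r = r) :
    pvG N grid r r = 0 := by
  simp only [pvG, pvOrbit, h]
  cases hb : pvCell grid r r == '1' <;> simp [List.countP, List.countP.go, hb]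

lemma pv_filter_lt (n m : ℕ) (hm : m ≤ n) :
    (Finset.range n).filter (fun r => r < m) = Finset.range m := by
  ext x; simp; omega


lemma pv_foldl_sum (l : List Int) (body : Int → Int → Int) (f : Int → Int) (a : Int)
    (hb : ∀ acc x, x ∈ l → body acc x = acc + f x) :
    l.foldl body a = a + (l.map f).sum := by
  rw [PySem.List.foldl_congr_mem l body (fun acc x => acc + f x) a hb,
    PySem.List.foldl_add]

lemma pv_rowsum (N : Int) (grid : List String) (n r : ℕ) (hN : N = (n : Int)) :
    ∑ c ∈ Finset.range n, (if pvWedge N (r : Int) (c : Int) then pvG N grid r c else 0)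
      = if r < n / 2 then
          ∑ k ∈ Finset.range (n - 1 - 2 * r), pvG N grid (r : Int) ((r : Int) + (k : Int))
        else 0 := by
  by_cases h : r < n / 2
  · rw [if_pos h, ← Finset.sum_filter]
    have hfil : (Finset.range n).filter (fun c : ℕ => pvWedge N (r : Int) (c : Int))
        = Finset.Ico r (n - 1 - r) := by
      ext x; simp only [Finset.mem_filter, Finset.mem_range, Finset.mem_Ico, pvWedge]
      omega
    rw [hfil, Finset.sum_Ico_eq_sum_range,
      show n - 1 - r - r = n - 1 - 2 * r by omega]
    apply Finset.sum_congr rfl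
    intro k _
    congr 1
  · rw [if_neg h]
    apply Finset.sum_eq_zero
    intro c _
    rw [if_neg]
    simp only [pvWedge, not_and, not_lt]
    omega

lemma pv_A_sum (N : Int) (grid : List String) (n : ℕ) (hN : N = (n : Int)) :
    solve N grid
      = ∑ r ∈ Finset.range n, ∑ c ∈ Finset.range n,
          (if pvWedge N (r : Int) (c : Int) then pvG N grid r c else 0) := by
  have hA : solve N grid
      = 0 + ((PySem.List.pyRange 0 (PySem.Int.floordiv N 2) 1).map (fun i =>
          ((PySem.List.pyRange i (N - i - 1) 1).map (fun c => pvG N grid i c)).sum)).sum := by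
    unfold solve
    refine pv_foldl_sum _ _ _ 0 ?_
    intro acc i _
    refine pv_foldl_sum _ _ _ acc ?_
    intro acc2 c _
    simp only []
    rw [pv_A_inner]
  rw [hA, zero_add, pv_sum_pyRange]
  have hfd : PySem.Int.floordiv N 2 = ((n / 2 : ℕ) : Int) := by
    rw [hN]; exact_mod_cast PySem.Int.floordiv_natCast n 2
  rw [show (PySem.Int.floordiv N 2 - 0).toNat = n / 2 by omega]
  have hR : ∀ r ∈ Finset.range (n / 2),
      ((PySem.List.pyRange (0 + (r : Int)) (N - (0 + (r : Int)) - 1) 1).map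
        (fun c => pvG N grid (0 + (r : Int)) c)).sum
      = ∑ k ∈ Finset.range (n - 1 - 2 * r), pvG N grid (r : Int) ((r : Int) + (k : Int)) := by
    intro r hr
    simp only [Finset.mem_range] at hr
    rw [pv_sum_pyRange, show (N - (0 + (r : Int)) - 1 - (0 + (r : Int))).toNat
        = n - 1 - 2 * r by omega]
    apply Finset.sum_congr rfl
    intro k _
    norm_num
  rw [Finset.sum_congr rfl hR]
  have : ∀ r ∈ Finset.range n,
      (∑ c ∈ Finset.range n, (if pvWedge N (r : Int) (c : Int) then pvG N grid r c else 0))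
      = (fun r : ℕ => if r < n / 2 then
          ∑ k ∈ Finset.range (n - 1 - 2 * r), pvG N grid (r : Int) ((r : Int) + (k : Int))
        else 0) r := fun r _ => pv_rowsum N grid n r hN
  rw [Finset.sum_congr rfl this, ← Finset.sum_filter, pv_filter_lt n (n / 2) (Nat.div_le_self n 2)]

lemma pv_B_sum (N : Int) (grid : List String) (n : ℕ) (hN : N = (n : Int)) :
    solve_alt N grid
      = ∑ r ∈ Finset.range n, ∑ c ∈ Finset.range n,
          (if pvCanon N (r : Int) (c : Int) then pvG N grid r c else 0) := by
  have hB : solve_alt N grid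
      = 0 + ((PySem.List.pyRange 0 N 1).map (fun r =>
          ((PySem.List.pyRange 0 N 1).map (fun c =>
            if (pvOrbit N r c).all (fun p => pvLexLe (r, c) p) then pvG N grid r c
            else 0)).sum)).sum := by
    unfold solve_alt
    refine pv_foldl_sum _ _ _ 0 ?_
    intro acc r _
    refine pv_foldl_sum _ _ _ acc ?_
    intro acc2 c _
    simp only []
    by_cases h : (pvOrbit N r c).all (fun p => pvLexLe (r, c) p)
    · rw [if_pos h, if_pos h]; rfl
    · rw [if_neg h, if_neg h]; ring
  rw [hB, zero_add, pv_sum_pyRange,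
    show (N - 0).toNat = n by omega]
  apply Finset.sum_congr rfl
  intro r _
  rw [pv_sum_pyRange, show (N - 0).toNat = n by omega]
  apply Finset.sum_congr rfl
  intro c _
  simp only [zero_add, pv_canon_test]

-- ===== VERDICT (by name: the statement is the Claim_ definition above) =====
theorem solve_spec : Claim_equal_solve := by
  intro N grid _ _
  unfold Spec_solve
  by_cases hN : N ≤ 0
  · have hfd : PySem.Int.floordiv N 2 ≤ 0 := by
      have := PySem.Int.floordiv_lt_iff_lt_mul (a := N) (b := 2) (q := 1) (by norm_num)
      omega
    rw [solve, solve_alt, PySem.List.pyRange_one_eq_nil hfd, PySem.List.pyRange_one_eq_nil hN]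
    rfl
  · have hn : N = (N.toNat : Int) := by omega
    rw [pv_A_sum N grid N.toNat hn, pv_B_sum N grid N.toNat hn]
    apply Finset.sum_congr rfl
    intro r hr
    apply Finset.sum_congr rfl
    intro c hc
    simp only [Finset.mem_range] at hr hc
    by_cases hw : pvWedge N (r : Int) (c : Int)
    · rw [if_pos hw, if_pos ((pv_canon_iff N _ _).2 (Or.inl hw))]
    · by_cases hcen : N = 2 * (r : Int) + 1 ∧ (r : Int) = (c : Int)
      · rw [if_pos ((pv_canon_iff N _ _).2 (Or.inr hcen)), if_neg hw]
        have hrc : r = c := by exact_mod_cast hcen.2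
        subst hrc
        exact (pv_center_zero N grid r (by omega)).symm
      · rw [if_neg hw, if_neg]
        rw [pv_canon_iff N _ _]
        tauto
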